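-- pv_equiv track=rewrite | github.com/ace-design/nlp-stories | comparison.py | strict_compare
-- ===== SOURCE A (Python) =====
-- import copy
--
-- def strict_compare (baseline, nlp):
--     '''
--     calculate the number of true/false positives and false negatives using STRICT comparison
--
--     Parameters:
--     baseline (list): the elements being compared to
--     nlp (list): the elements comparing for accuracy
--
--     Returns:
--     comparison_results (2D list): includes the elements identified as true/false positives and false negatives
--     '''
--
--     true_positive = []
--     false_positive = []
--
--     for i in range(len(nlp)):
--         nlp_element = nlp[i].lower().strip()
--         not_true_positive = True
--
--         for j in range (len(baseline)):
--             baseline_element = baseline[j].lower().strip()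
--
--             if nlp_element == baseline_element:
--                 true_positive.append(baseline[j])
--                 baseline.pop(j)
--                 not_true_positive = False
--                 break
--
--         if not_true_positive:
--             false_positive.append(nlp_element)
--
--     false_nagative = copy.deepcopy(baseline)
--
--     comparison_results = [true_positive, false_positive, false_nagative]
--
--     return comparison_results
-- ===== SOURCE B (Python) =====
-- def strict_compare(baseline, nlp):
--     # Index baseline by normalized value into per-value queues of indices;
--     # each nlp element pops the earliest unused matching index (O(n+m)).
--     queues = {}
--     for i, b in enumerate(baseline):
--         queues.setdefault(b.lower().strip(), []).append(i)
--     used = set()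
--     true_positive = []
--     false_positive = []
--     for x in nlp:
--         k = x.lower().strip()
--         q = queues.get(k)
--         if q:
--             i = q.pop(0)
--             used.add(i)
--             true_positive.append(baseline[i])
--         else:
--             false_positive.append(k)
--     false_negative = [b for i, b in enumerate(baseline) if i not in used]
--     baseline[:] = false_negative  # mirror A's in-place removal of matched elements
--     return [true_positive, false_positive, false_negative]
-- ===== Notes on version B (the rewrite author's own statement) =====
-- stated objective: faster
-- what changed: Replaces the per-nlp-element rescan of (and pop from) the baseline list with a dict built once that maps each normalized baseline value to the queue of its indices; each nlp element pops the earliest matching index in O(1), and false negatives are read off the unused indices.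
import Mathlib
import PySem

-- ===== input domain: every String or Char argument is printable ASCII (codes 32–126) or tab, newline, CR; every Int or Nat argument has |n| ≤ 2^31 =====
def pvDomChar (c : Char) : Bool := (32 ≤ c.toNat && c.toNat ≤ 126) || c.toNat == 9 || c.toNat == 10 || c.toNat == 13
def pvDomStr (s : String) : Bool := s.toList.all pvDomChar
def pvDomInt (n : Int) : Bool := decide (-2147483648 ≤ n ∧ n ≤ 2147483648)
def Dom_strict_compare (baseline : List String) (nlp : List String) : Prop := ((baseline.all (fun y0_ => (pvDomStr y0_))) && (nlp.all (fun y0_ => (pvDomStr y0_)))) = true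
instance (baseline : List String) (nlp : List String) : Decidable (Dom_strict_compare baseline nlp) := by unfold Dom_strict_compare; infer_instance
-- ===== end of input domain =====

-- ===== PORT A =====
-- A: exact match counting by repeated scan-and-pop of the mutable baseline list.
-- (A mutates its baseline argument in place; B mirrors that in Python, the Lean claim is about the return value.)
def pvNorm (s : String) : String := PySem.Str.strip (PySem.Str.lower s)

-- inner 'for j' loop of A: find the first baseline element with equal normalized
-- value, return it together with the baseline after pop(j)
def pvScanA (k : String) : List String -> Option (String × List String)
  | [] => none
  | b :: bs =>
    if pvNorm b = k then some (b, bs)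
    else
      match pvScanA k bs with
      | some (m, rest) => some (m, b :: rest)
      | none => none

-- outer 'for i' loop of A over nlp, carrying the mutable baseline, tp and fp
def pvLoopA : List String -> List String -> List String -> List String -> List (List String)
  | bs, [], tp, fp => [tp, fp, bs]
  | bs, x :: xs, tp, fp =>
    match pvScanA (pvNorm x) bs with
    | some (m, rest) => pvLoopA rest xs (tp ++ [m]) fp
    | none => pvLoopA bs xs tp (fp ++ [pvNorm x])

def strict_compare (baseline : List String) (nlp : List String) : List (List String) :=
  pvLoopA baseline nlp [] []

-- ===== PORT B =====
-- B: index baseline once by normalized value into queues of indices; pop the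
-- earliest matching index per nlp element; false negatives = unused indices.
def pvBuildQ (baseline : List String) : PySem.Dict String (List Int) :=
  (PySem.List.enumerate baseline 0).foldl
    (fun d p => d.modify (pvNorm p.2) [] (fun q => q ++ [p.1])) PySem.Dict.empty

-- 'for x in nlp' loop of B; returns (true_positive, false_positive, used)
def pvLoopB (baseline : List String) :
    List String -> PySem.Dict String (List Int) -> PySem.Set Int ->
    List String -> List String -> List String × List String × PySem.Set Int
  | [], _, used, tp, fp => (tp, fp, used)
  | x :: xs, d, used, tp, fp =>
    let k := pvNorm x
    match d.getD k [] with
    | i :: q' =>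
        pvLoopB baseline xs (d.insert k q') (PySem.Set.add used i)
          (tp ++ [PySem.List.pyGetD baseline i ""]) fp
    | [] => pvLoopB baseline xs d used tp (fp ++ [k])

def strict_compare_alt (baseline : List String) (nlp : List String) : List (List String) :=
  match pvLoopB baseline nlp (pvBuildQ baseline) [] [] [] with
  | (tp, fp, used) =>
    [tp, fp,
     ((PySem.List.enumerate baseline 0).filter
        (fun p => ! PySem.Set.contains used p.1)).map (fun p => p.2)]

-- ===== PRECONDITION & SPEC =====
def Spec_strict_compare (baseline : List String) (nlp : List String) (out : List (List String)) : Prop := out = strict_compare_alt baseline nlp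
instance (baseline : List String) (nlp : List String) (out : List (List String)) : Decidable (Spec_strict_compare baseline nlp out) := by unfold Spec_strict_compare; infer_instance

-- ===== CLAIM (what is proved, stated in full; the proofs are below) =====
def Claim_equal_strict_compare : Prop := ∀ (baseline : List String) (nlp : List String), Dom_strict_compare baseline nlp → Spec_strict_compare baseline nlp (strict_compare baseline nlp)


-- ===== LEMMAS AND PROOFS =====

-- A's inner scan finds nothing when no element normalizes to the key
theorem pvScanA_eq_none {k : String} {l : List String} (h : ∀ b ∈ l, pvNorm b ≠ k) :
    pvScanA k l = none := by
  induction l with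
  | nil => rfl
  | cons b bs ih =>
    have hb : pvNorm b ≠ k := h b (by simp)
    have hbs : pvScanA k bs = none := ih (fun x hx => h x (by simp [hx]))
    simp [pvScanA, hb, hbs]

-- A's inner scan removes exactly the first matching element
theorem pvScanA_split {k b0 : String} (pre suf : List String)
    (hpre : ∀ b ∈ pre, pvNorm b ≠ k) (hb0 : pvNorm b0 = k) :
    pvScanA k (pre ++ b0 :: suf) = some (b0, pre ++ suf) := by
  induction pre with
  | nil => simp [pvScanA, hb0]
  | cons b bs ih =>
    have hb : pvNorm b ≠ k := hpre b (by simp)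
    have hbs := ih (fun x hx => hpre x (by simp [hx]))
    simp [pvScanA, hb, hbs]

-- the queue for key k holds exactly the indices of the pairs normalizing to k, in order
theorem pvBuildQ_getD_aux (ps : List (Int × String)) (d : PySem.Dict String (List Int)) (k : String) :
    (ps.foldl (fun d p => d.modify (pvNorm p.2) [] (fun q => q ++ [p.1])) d).getD k []
      = d.getD k [] ++ (ps.filter (fun p => pvNorm p.2 == k)).map (fun p => p.1) := by
  induction ps generalizing d with
  | nil => simp
  | cons p ps ih =>
    simp only [List.foldl_cons, List.filter_cons]
    rw [ih, PySem.Dict.getD_modify]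
    by_cases h : pvNorm p.2 = k
    · simp [h]
    · simp [h, Ne.symm h]

-- membership in Set.add, as a Bool equation on contains
theorem pvContains_add (used : PySem.Set Int) (i j : Int) :
    PySem.Set.contains (PySem.Set.add used i) j
      = (PySem.Set.contains used j || j == i) := by
  rw [PySem.Set.add_eq_ite]
  by_cases hi : i ∈ used
  · rw [if_pos hi]
    by_cases hj : j = i
    · subst hj; simp [PySem.Set.contains_eq_listContains, hi]
    · simp [hj]
  · rw [if_neg hi]
    simp [PySem.Set.contains_eq_listContains, Or.comm, beq_eq_decide]
    exact Bool.or_comm _ _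

-- an element of enumerate baseline is (index, baseline[index])
theorem pvGet_of_mem_enum (baseline : List String) (p : Int × String)
    (hp : p ∈ PySem.List.enumerate baseline 0) :
    PySem.List.pyGetD baseline p.1 "" = p.2 := by
  obtain ⟨j, hj, hpeq⟩ := (PySem.List.mem_enumerate_iff _ _ _).mp hp
  subst hpeq
  simp [List.getD_eq_getElem?_getD, List.getElem?_eq_getElem hj]

-- MAIN INVARIANT: A's remaining baseline is exactly the not-yet-used part of
-- enumerate baseline, and B's queues hold its indices grouped by normalized value.
theorem pvMain (baseline : List String) (nlp : List String) :
    ∀ (rs : List (Int × String)) (d : PySem.Dict String (List Int))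
      (used : PySem.Set Int) (tp fp : List String),
    rs = (PySem.List.enumerate baseline 0).filter
           (fun p => ! PySem.Set.contains used p.1) →
    (∀ k, d.getD k [] = (rs.filter (fun p => pvNorm p.2 == k)).map (fun p => p.1)) →
    pvLoopA (rs.map (fun p => p.2)) nlp tp fp =
      [(pvLoopB baseline nlp d used tp fp).1,
       (pvLoopB baseline nlp d used tp fp).2.1,
       ((PySem.List.enumerate baseline 0).filter
          (fun p => ! PySem.Set.contains (pvLoopB baseline nlp d used tp fp).2.2 p.1)).map
         (fun p => p.2)] := by
  induction nlp with
  | nil =>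
    intro rs d used tp fp h1 h2
    simp only [pvLoopA, pvLoopB]
    rw [← h1]
  | cons x xs ih =>
    intro rs d used tp fp h1 h2
    rcases hq : d.getD (pvNorm x) [] with _ | ⟨i, q'⟩
    · -- empty queue: A finds no match either
      have hfil : rs.filter (fun p => pvNorm p.2 == pvNorm x) = [] := by
        have := h2 (pvNorm x); rw [hq] at this
        exact List.map_eq_nil_iff.mp this.symm
      have hnone : pvScanA (pvNorm x) (rs.map (fun p => p.2)) = none := by
        apply pvScanA_eq_none
        intro b hb
        obtain ⟨p, hp, rfl⟩ := List.mem_map.mp hb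
        have := List.filter_eq_nil_iff.mp hfil p hp
        simpa using this
      simp only [pvLoopA, hnone, pvLoopB, hq]
      exact ih rs d used tp (fp ++ [pvNorm x]) h1 h2
    · -- queue i :: q': A pops the first match, which has index i
      have hfil : (rs.filter (fun p => pvNorm p.2 == pvNorm x)).map (fun p => p.1) = i :: q' := by
        rw [← h2 (pvNorm x), hq]
      rcases hc : rs.filter (fun p => pvNorm p.2 == pvNorm x) with _ | ⟨p0, ps0⟩
      · rw [hc] at hfil; simp at hfil
      rw [hc] at hfil
      simp only [List.map_cons, List.cons.injEq] at hfil
      obtain ⟨hp0i, hps0⟩ := hfil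
      obtain ⟨pre, suf, hrs, hpre, hp0, hsuf⟩ := List.filter_eq_cons_iff.mp hc
      have hp0n : pvNorm p0.2 = pvNorm x := by simpa using hp0
      have hscan : pvScanA (pvNorm x) (rs.map (fun p => p.2))
          = some (p0.2, (pre ++ suf).map (fun p => p.2)) := by
        rw [hrs]
        simp only [List.map_append, List.map_cons]
        exact pvScanA_split _ _
          (fun b hb => by
            obtain ⟨p, hp, rfl⟩ := List.mem_map.mp hb
            simpa using hpre p hp) hp0n
      have hp0mem : p0 ∈ PySem.List.enumerate baseline 0 := by
        have hmem : p0 ∈ rs := by rw [hrs]; simp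
        rw [h1] at hmem
        exact List.mem_of_mem_filter hmem
      have hget : PySem.List.pyGetD baseline i "" = p0.2 := by
        rw [← hp0i]; exact pvGet_of_mem_enum baseline p0 hp0mem
      have hpw : (pre ++ p0 :: suf).Pairwise (fun p q => p.1 < q.1) := by
        rw [← hrs, h1]
        exact List.Pairwise.filter _ (PySem.List.pairwise_lt_enumerate _ _)
      have hpre_lt : ∀ p ∈ pre, p.1 < i := by
        intro p hp
        have := (List.pairwise_append.mp hpw).2.2 p hp p0 (by simp)
        omega
      have hsuf_gt : ∀ p ∈ suf, i < p.1 := by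
        intro p hp
        have := (List.pairwise_cons.mp (List.pairwise_append.mp hpw).2.1).1 p hp
        omega
      have h1' : pre ++ suf = (PySem.List.enumerate baseline 0).filter
          (fun p => ! PySem.Set.contains (PySem.Set.add used i) p.1) := by
        have step1 : (PySem.List.enumerate baseline 0).filter
            (fun p => ! PySem.Set.contains (PySem.Set.add used i) p.1)
            = ((PySem.List.enumerate baseline 0).filter
                (fun p => ! PySem.Set.contains used p.1)).filter
                (fun p => ! (p.1 == i)) := by
          rw [List.filter_filter]
          exact List.filter_congr (fun p _ => by
            rw [pvContains_add, Bool.not_or, Bool.and_comm])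
        rw [step1, ← h1, hrs, List.filter_append, List.filter_cons]
        have hp0f : (! (p0.1 == i)) = false := by simp [hp0i]
        rw [hp0f]
        simp only [Bool.false_eq_true, if_false]
        rw [List.filter_eq_self.mpr (fun p hp => by
              have := hpre_lt p hp; simp; omega),
            List.filter_eq_self.mpr (fun p hp => by
              have := hsuf_gt p hp; simp; omega)]
      have h2' : ∀ k, (d.insert (pvNorm x) q').getD k []
          = ((pre ++ suf).filter (fun p => pvNorm p.2 == k)).map (fun p => p.1) := by
        intro k
        rw [PySem.Dict.getD_insert]
        by_cases hk : k = pvNorm x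
        · rw [if_pos hk, hk, List.filter_append]
          rw [List.filter_eq_nil_iff.mpr (fun p hp => by simpa using hpre p hp)]
          rw [List.nil_append, hsuf, hps0]
        · rw [if_neg hk, h2 k, hrs]
          rw [List.filter_append, List.filter_append, List.filter_cons]
          have hne : ((pvNorm p0.2 == k) : Bool) = false := by
            rw [hp0n]; exact beq_eq_false_iff_ne.mpr (fun h => hk h.symm)
          rw [hne]
          simp only [Bool.false_eq_true, if_false, List.map_append]
      simp only [pvLoopA, hscan, pvLoopB, hq]
      rw [hget]
      exact ih (pre ++ suf) (d.insert (pvNorm x) q') (PySem.Set.add used i)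
        (tp ++ [p0.2]) fp h1' h2'

-- ===== VERDICT (by name: the statement is the Claim_ definition above) =====
theorem strict_compare_spec : Claim_equal_strict_compare := by
  intro baseline nlp _
  unfold Spec_strict_compare
  have h2 : ∀ k, (pvBuildQ baseline).getD k []
      = ((PySem.List.enumerate baseline 0).filter (fun p => pvNorm p.2 == k)).map (fun p => p.1) := by
    intro k
    rw [pvBuildQ, pvBuildQ_getD_aux]
    simp
  have h1 : PySem.List.enumerate baseline 0
      = (PySem.List.enumerate baseline 0).filter
          (fun p => ! PySem.Set.contains ([] : PySem.Set Int) p.1) := by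
    rw [List.filter_eq_self.mpr]
    intro p _
    simp [PySem.Set.contains_eq_listContains]
  have h := pvMain baseline nlp (PySem.List.enumerate baseline 0) (pvBuildQ baseline) [] [] [] h1 h2
  rw [PySem.List.map_snd_enumerate] at h
  rw [strict_compare, strict_compare_alt]
  rcases hB : pvLoopB baseline nlp (pvBuildQ baseline) [] [] [] with ⟨tp, fp, used⟩
  rw [hB] at h
  simpa using h
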